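-- pv_equiv track=rewrite | github.com/eyesic/comp550 | Chapter 1: Basic Algs/quiz1.py | binary_search_trace
-- ===== SOURCE A (Python) =====
-- def binary_search_trace(A, t):
--     left, right = 0, len(A) - 1
--     trace = []
--
--     while left <= right:
--         m = (left + right) // 2
--         trace.append(m)
--
--         if A[m] == t:
--             return trace
--         elif A[m] < t:
--             left = m + 1
--         else:
--             right = m - 1
--
--     return trace  # Return trace even if the target is not found
-- ===== SOURCE B (Python) =====
-- def binary_search_trace(A, t):
--     # fuel-bounded tail recursion, trace built back-to-front and reversed at the end
--     def go(fuel, lo, hi, acc):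
--         if fuel == 0 or hi < lo:
--             return acc
--         m = (lo + hi) // 2
--         v = A[m]
--         if v < t:
--             return go(fuel - 1, m + 1, hi, [m] + acc)
--         if v > t:
--             return go(fuel - 1, lo, m - 1, [m] + acc)
--         return [m] + acc
--     return go(len(A) + 1, 0, len(A) - 1, [])[::-1]
-- ===== Notes on version B (the rewrite author's own statement) =====
-- stated objective: alternative
-- what changed: Replaces A's unbounded while-loop that appends midpoints to a growing trace by a fuel-bounded tail-recursive helper that prepends each midpoint to an accumulator (building the trace back-to-front), tests < / > instead of == / <, and reverses the accumulator once at the end.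
import Mathlib
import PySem

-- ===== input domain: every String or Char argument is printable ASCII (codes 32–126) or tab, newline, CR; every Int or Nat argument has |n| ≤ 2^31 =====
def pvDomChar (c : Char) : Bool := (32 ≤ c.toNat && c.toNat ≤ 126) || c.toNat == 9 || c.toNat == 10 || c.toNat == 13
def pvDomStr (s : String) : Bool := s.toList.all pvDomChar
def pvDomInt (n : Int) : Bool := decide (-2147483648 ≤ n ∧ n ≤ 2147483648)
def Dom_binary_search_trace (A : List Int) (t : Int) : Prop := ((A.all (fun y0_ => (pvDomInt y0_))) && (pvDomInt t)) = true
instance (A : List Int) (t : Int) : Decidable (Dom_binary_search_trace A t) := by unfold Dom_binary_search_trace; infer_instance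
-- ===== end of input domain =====

-- ===== PORT A =====
-- A's while-loop: mutable state (left, right, trace); trace grows by appending at the back.
-- The 'none' branch of the index lookup is only a totality guard (the loop keeps m in range).
def pvALoop (A : List Int) (t : Int) (left right : Int) (trace : List Int) : List Int :=
  if h : left ≤ right then
    match PySem.List.pyGet? A (PySem.Int.floordiv (left + right) 2) with
    | none => trace ++ [PySem.Int.floordiv (left + right) 2]
    | some v =>
      if v = t then trace ++ [PySem.Int.floordiv (left + right) 2]
      else if v < t then
        pvALoop A t (PySem.Int.floordiv (left + right) 2 + 1) right
          (trace ++ [PySem.Int.floordiv (left + right) 2])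
      else
        pvALoop A t left (PySem.Int.floordiv (left + right) 2 - 1)
          (trace ++ [PySem.Int.floordiv (left + right) 2])
  else trace
termination_by (right - left + 1).toNat
decreasing_by
  · have hb := PySem.Int.floordiv_two_mid_bounds h; omega
  · have hb := PySem.Int.floordiv_two_mid_bounds h; omega

def binary_search_trace (A : List Int) (t : Int) : List Int :=
  pvALoop A t 0 ((A.length : Int) - 1) []

-- ===== PORT B =====
-- B's fuel-bounded tail recursion: midpoints are PREPENDED to the accumulator and the
-- result reversed once at the end ([::-1] → List.reverse); fuel len(A)+1 never runs out
-- because the interval width shrinks on every call.  The 'none' lookup branch is a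
-- totality guard (B's Python indexing is always in range).
def pvBGo (A : List Int) (t : Int) : Nat → Int → Int → List Int → List Int
  | 0, _, _, acc => acc
  | Nat.succ fuel, lo, hi, acc =>
    if hi < lo then acc
    else
      let m := PySem.Int.floordiv (lo + hi) 2
      match PySem.List.pyGet? A m with
      | none => m :: acc
      | some v =>
        if v < t then pvBGo A t fuel (m + 1) hi (m :: acc)
        else if t < v then pvBGo A t fuel lo (m - 1) (m :: acc)
        else m :: acc

def binary_search_trace_alt (A : List Int) (t : Int) : List Int :=
  (pvBGo A t (A.length + 1) 0 ((A.length : Int) - 1) []).reverse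

-- ===== PRECONDITION & SPEC =====
def Spec_binary_search_trace (A : List Int) (t : Int) (out : List Int) : Prop := out = binary_search_trace_alt A t
instance (A : List Int) (t : Int) (out : List Int) : Decidable (Spec_binary_search_trace A t out) := by unfold Spec_binary_search_trace; infer_instance

-- ===== CLAIM (what is proved, stated in full; the proofs are below) =====
def Claim_equal_binary_search_trace : Prop := ∀ (A : List Int) (t : Int), Dom_binary_search_trace A t → Spec_binary_search_trace A t (binary_search_trace A t)

-- ===== LEMMAS AND PROOFS =====

-- B's prepend-accumulator recursion: the accumulator is a suffix of the result.
theorem pvBGo_acc (A : List Int) (t : Int) :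
    ∀ (fuel : Nat) (lo hi : Int) (acc : List Int),
      pvBGo A t fuel lo hi acc = pvBGo A t fuel lo hi [] ++ acc := by
  intro fuel
  induction fuel with
  | zero => intro lo hi acc; simp [pvBGo]
  | succ fuel ih =>
    intro lo hi acc
    rw [pvBGo, pvBGo]
    by_cases hlt : hi < lo
    · simp [hlt]
    · simp only [if_neg hlt]
      cases hg : PySem.List.pyGet? A (PySem.Int.floordiv (lo + hi) 2) with
      | none => simp
      | some v =>
        simp only []
        split_ifs
        · rw [ih _ _ (_ :: acc), ih _ _ [_]]; simp
        · rw [ih _ _ (_ :: acc), ih _ _ [_]]; simp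
        · simp

-- With enough fuel (more than the interval width), A's append-accumulator loop equals the
-- reverse of B's prepend-accumulator recursion, shifted by the two accumulators.
theorem pvALoop_eq_bgo (A : List Int) (t : Int) :
    ∀ (fuel : Nat) (lo hi : Int) (trace acc : List Int),
      (hi - lo + 1).toNat < fuel →
      pvALoop A t lo hi trace = trace ++ ((pvBGo A t fuel lo hi acc).reverse.drop acc.reverse.length) := by
  intro fuel
  induction fuel with
  | zero => intro lo hi trace acc h; omega
  | succ fuel ih =>
    intro lo hi trace acc h
    rw [pvALoop, pvBGo]
    by_cases hle : lo ≤ hi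
    · have hb := PySem.Int.floordiv_two_mid_bounds hle
      simp only [dif_pos hle, if_neg (by omega : ¬ hi < lo)]
      cases hg : PySem.List.pyGet? A (PySem.Int.floordiv (lo + hi) 2) with
      | none => simp
      | some v =>
        simp only []
        by_cases h1 : v = t
        · simp [h1]
        · by_cases h2 : v < t
          · simp only [if_neg h1, if_pos h2, if_neg (by omega : ¬ t < v)]
            rw [ih _ _ _ (PySem.Int.floordiv (lo + hi) 2 :: acc) (by omega),
              pvBGo_acc A t fuel _ _ (_ :: acc)]
            simp [List.drop_append]
          · simp only [if_neg h1, if_neg h2, if_pos (by omega : t < v)]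
            rw [ih _ _ _ (PySem.Int.floordiv (lo + hi) 2 :: acc) (by omega),
              pvBGo_acc A t fuel _ _ (_ :: acc)]
            simp [List.drop_append]
    · simp [dif_neg hle, if_pos (by omega : hi < lo)]

-- ===== VERDICT (by name: the statement is the Claim_ definition above) =====
theorem binary_search_trace_spec : Claim_equal_binary_search_trace := by
  intro A t _
  unfold Spec_binary_search_trace binary_search_trace binary_search_trace_alt
  simpa using pvALoop_eq_bgo A t (A.length + 1) 0 ((A.length : Int) - 1) [] [] (by omega)
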